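-- pv_equiv track=rewrite | github.com/alexbjorling/advent_of_code | 2019/04/part2.py | has_strict_double
-- ===== SOURCE A (Python) =====
-- def has_strict_double(n):
--     # does this number have a pair of identical adjacent numbers that's
--     # not a part of a larger group of identical numbers?
--     s = str(n)
--
--     # make a list of the size of each group of identical numbers
--     last = ''
--     groups = []
--     for i in range(len(s)):
--         if s[i] == last:
--             groups[-1] += 1
--         else:
--             groups.append(1)
--         last = s[i]
--
--     # see if any of them had size 2
--     return (2 in groups)
-- ===== SOURCE B (Python) =====
-- def has_strict_double(n):
--     s = str(n)
--     for i in range(len(s) - 1):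
--         if s[i] == s[i + 1] and (i == 0 or s[i - 1] != s[i]) and (i + 2 >= len(s) or s[i + 2] != s[i]):
--             return True
--     return False
-- ===== Notes on version B (the rewrite author's own statement) =====
-- stated objective: alternative
-- what changed: Instead of building the full run-length list of digit groups and then testing membership of size two, B does a single indexed scan that tests an isolated-pair window (equal neighbours, different char before and after, with boundary checks) and returns on the first match.
import Mathlib
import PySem

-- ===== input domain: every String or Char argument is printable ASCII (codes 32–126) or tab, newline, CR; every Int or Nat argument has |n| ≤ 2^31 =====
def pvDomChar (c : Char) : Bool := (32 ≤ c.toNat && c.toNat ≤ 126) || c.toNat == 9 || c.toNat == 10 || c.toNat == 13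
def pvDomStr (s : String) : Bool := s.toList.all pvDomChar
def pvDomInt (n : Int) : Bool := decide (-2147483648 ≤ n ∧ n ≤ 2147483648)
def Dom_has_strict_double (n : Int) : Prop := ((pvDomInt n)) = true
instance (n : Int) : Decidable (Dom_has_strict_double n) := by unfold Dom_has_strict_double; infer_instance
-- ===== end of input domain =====

-- B replaces A's run-length-list construction by a single indexed isolated-pair window scan; equal return values proved for all inputs.

-- ===== PORT A =====
-- groups[-1] += 1 (never reached on an empty list, since '' never equals a one-char string)
def pvBumpLast : List Int → List Int
  | [] => []
  | [x] => [x + 1]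
  | x :: y :: xs => x :: pvBumpLast (y :: xs)

-- the for-loop over i in range(len(s)) reading s[i]: fold over the chars in order;
-- last = '' initially, then the previous char: ported as Option Char (none = '')
def pvALoop : List Char → Option Char → List Int → Option Char × List Int
  | [], last, groups => (last, groups)
  | c :: rest, last, groups =>
      pvALoop rest (some c) (if some c = last then pvBumpLast groups else groups ++ [1])

def has_strict_double (n : Int) : Bool :=
  let s := PySem.Int.toChars n
  decide ((2 : Int) ∈ (pvALoop s none []).2)

-- ===== PORT B =====
-- the window test of Source B: s[i]==s[i+1] and (i==0 or s[i-1]!=s[i]) and (i+2>=len(s) or s[i+2]!=s[i])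
def pvWinB (s : List Char) (i : Nat) : Bool :=
  (s[i]? == s[i + 1]?) && (decide (i = 0) || (s[i - 1]? != s[i]?))
    && (decide (s.length ≤ i + 2) || (s[i + 2]? != s[i]?))

def has_strict_double_alt (n : Int) : Bool :=
  let s := PySem.Int.toChars n
  (List.range (s.length - 1)).any fun i => pvWinB s i

-- ===== PRECONDITION & SPEC =====
def Spec_has_strict_double (n : Int) (out : Bool) : Prop := out = has_strict_double_alt n
instance (n : Int) (out : Bool) : Decidable (Spec_has_strict_double n out) := by unfold Spec_has_strict_double; infer_instance

-- ===== CLAIM (what is proved, stated in full; the proofs are below) =====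
def Claim_equal_has_strict_double : Prop := ∀ (n : Int), Dom_has_strict_double n → Spec_has_strict_double n (has_strict_double n)

-- ===== LEMMAS AND PROOFS =====

-- the run lengths of l, given that the k most recent chars were all p
def pvRuns : Char → Int → List Char → List Int
  | _, k, [] => [k]
  | p, k, c :: rest => if c = p then pvRuns p (k + 1) rest else k :: pvRuns c 1 rest

-- the isolated-pair window as a Prop
def pvW (s : List Char) (i : Nat) : Prop :=
  i + 1 < s.length ∧ s[i]? = s[i + 1]? ∧ (i = 0 ∨ s[i - 1]? ≠ s[i]?)
    ∧ (s.length ≤ i + 2 ∨ s[i + 2]? ≠ s[i]?)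

lemma pvBumpLast_append (gs : List Int) (k : Int) :
    pvBumpLast (gs ++ [k]) = gs ++ [k + 1] := by
  induction gs with
  | nil => simp [pvBumpLast]
  | cons x xs ih =>
    cases xs with
    | nil => simp [pvBumpLast]
    | cons y ys => simpa [pvBumpLast] using ih

lemma pvALoop_groups : ∀ (l : List Char) (p : Char) (k : Int) (gs : List Int),
    (pvALoop l (some p) (gs ++ [k])).2 = gs ++ pvRuns p k l := by
  intro l
  induction l with
  | nil => intro p k gs; simp [pvALoop, pvRuns]
  | cons c rest ih =>
    intro p k gs
    by_cases hc : c = p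
    · subst hc
      simp only [pvALoop, pvRuns, pvBumpLast_append]
      exact ih c (k + 1) gs
    · have h1 : (some c = some p) = False := by simp [hc]
      simp only [pvALoop, h1, if_false, pvRuns, if_neg hc]
      have : gs ++ [k] ++ [1] = (gs ++ [k]) ++ [1] := rfl
      rw [this, ih c 1 (gs ++ [k])]
      simp

lemma pvGetRep (k : Nat) (p : Char) (l : List Char) (i : Nat) :
    (List.replicate k p ++ l)[i]? = if i < k then some p else l[i - k]? := by
  by_cases h : i < k
  · rw [List.getElem?_append_left (by simpa using h)]
    simp [h]
  · rw [List.getElem?_append_right (by simpa using h)]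
    simp [h]

lemma pvCore : ∀ (l : List Char) (p : Char) (k : Nat), 1 ≤ k →
    ((2 : Int) ∈ pvRuns p (k : Int) l ↔ ∃ i, pvW (List.replicate k p ++ l) i) := by
  intro l
  induction l with
  | nil =>
    intro p k hk
    simp only [pvRuns, List.append_nil, List.mem_singleton]
    constructor
    · intro h2
      have hk2 : k = 2 := by omega
      subst hk2
      exact ⟨0, by simp [pvW, List.replicate]⟩
    · rintro ⟨i, h1, heq, hleft, hright⟩
      simp only [List.length_replicate] at h1 hright
      have hi0 : i = 0 := by
        rcases hleft with h | h
        · exact h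
        · exfalso
          apply h
          rw [List.getElem?_replicate, List.getElem?_replicate, if_pos (by omega), if_pos (by omega)]
      have hk2 : k ≤ i + 2 := by
        rcases hright with h | h
        · exact h
        · by_contra hlt
          apply h
          rw [List.getElem?_replicate, List.getElem?_replicate, if_pos (by omega), if_pos (by omega)]
      omega
  | cons c rest ih =>
    intro p k hk
    by_cases hc : c = p
    · subst hc
      simp only [pvRuns]
      have hcast : (k : Int) + 1 = ((k + 1 : Nat) : Int) := by push_cast; ring
      rw [hcast, show List.replicate k c ++ c :: rest = List.replicate (k + 1) c ++ rest from by
        rw [List.replicate_succ']; simp]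
      exact ih c (k + 1) (by omega)
    · simp only [pvRuns, if_neg hc, List.mem_cons]
      have ih1 := ih c 1 le_rfl
      rw [Nat.cast_one] at ih1
      rw [ih1]
      simp only [List.replicate_one, List.singleton_append]
      have hlen : (List.replicate k p ++ c :: rest).length = k + (rest.length + 1) := by
        simp
      constructor
      · rintro (h2 | ⟨j, hw⟩)
        · have hk2 : k = 2 := by omega
          subst hk2
          refine ⟨0, ?_, ?_, Or.inl rfl, Or.inr ?_⟩
          · rw [hlen]; omega
          · rw [pvGetRep, pvGetRep, if_pos (by omega), if_pos (by omega)]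
          · rw [pvGetRep, pvGetRep, if_neg (by omega), if_pos (by omega)]
            intro h
            exact hc (Option.some.inj h.symm).symm
        · obtain ⟨h1, heq, hleft, hright⟩ := hw
          simp only [List.length_cons] at h1
          refine ⟨k + j, ?_, ?_, Or.inr ?_, ?_⟩
          · rw [hlen]; omega
          · rw [pvGetRep, pvGetRep, if_neg (by omega), if_neg (by omega)]
            have e1 : k + j - k = j := by omega
            have e2 : k + j + 1 - k = j + 1 := by omega
            rw [e1, e2]; exact heq
          · by_cases hj0 : j = 0
            · subst hj0
              rw [pvGetRep, pvGetRep, if_pos (by omega), if_neg (by omega)]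
              have e1 : k + 0 - k = 0 := by omega
              rw [e1]
              intro h
              exact hc (Option.some.inj h).symm
            · have hne : (c :: rest)[j - 1]? ≠ (c :: rest)[j]? := hleft.resolve_left hj0
              rw [pvGetRep, pvGetRep, if_neg (by omega), if_neg (by omega)]
              have e1 : k + j - 1 - k = j - 1 := by omega
              have e2 : k + j - k = j := by omega
              rw [e1, e2]; exact hne
          · rcases hright with hl | hne
            · left; rw [hlen]; simp only [List.length_cons] at hl; omega
            · right
              rw [pvGetRep, pvGetRep, if_neg (by omega), if_neg (by omega)]
              have e1 : k + j + 2 - k = j + 2 := by omega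
              have e2 : k + j - k = j := by omega
              rw [e1, e2]; exact hne
      · rintro ⟨i, h1, heq, hleft, hright⟩
        rw [hlen] at h1
        rcases Nat.lt_trichotomy (i + 1) k with hik | hik | hik
        · -- both in the replicate part
          left
          have hi0 : i = 0 := by
            rcases hleft with h | h
            · exact h
            · exfalso
              apply h
              rw [pvGetRep, pvGetRep, if_pos (by omega), if_pos (by omega)]
          have hk2 : i + 2 = k := by
            rcases hright with h | h
            · rw [hlen] at h; omega
            · by_contra hne2
              apply h
              rw [pvGetRep, pvGetRep, if_pos (by omega), if_pos (by omega)]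
          omega
        · -- i straddles the boundary: s[i] = p, s[i+1] = c, contradiction
          exfalso
          rw [pvGetRep, pvGetRep, if_pos (by omega), if_neg (by omega)] at heq
          have e1 : i + 1 - k = 0 := by omega
          rw [e1] at heq
          simp only [List.getElem?_cons_zero] at heq
          exact hc (Option.some.inj heq).symm
        · -- entirely in c :: rest
          right
          refine ⟨i - k, ?_, ?_, ?_, ?_⟩
          · simp only [List.length_cons]; omega
          · rw [pvGetRep, pvGetRep, if_neg (by omega), if_neg (by omega)] at heq
            have e2 : i + 1 - k = i - k + 1 := by omega
            rw [e2] at heq; exact heq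
          · by_cases hj0 : i - k = 0
            · exact Or.inl hj0
            · right
              rcases hleft with h | h
              · omega
              · rw [pvGetRep, pvGetRep, if_neg (by omega), if_neg (by omega)] at h
                have e1 : i - 1 - k = i - k - 1 := by omega
                rw [e1] at h; exact h
          · rcases hright with h | h
            · left; rw [hlen] at h; simp only [List.length_cons]; omega
            · right
              rw [pvGetRep, pvGetRep, if_neg (by omega), if_neg (by omega)] at h
              have e1 : i + 2 - k = i - k + 2 := by omega
              rw [e1] at h; exact h

lemma pvWinB_iff (s : List Char) (i : Nat) (h : i + 1 < s.length) :
    pvWinB s i = true ↔ pvW s i := by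
  simp [pvWinB, pvW, h, bne_iff_ne, beq_iff_eq]
  tauto

lemma pvMain (l : List Char) :
    decide ((2 : Int) ∈ (pvALoop l none []).2) = (List.range (l.length - 1)).any fun i => pvWinB l i := by
  cases l with
  | nil => simp [pvALoop]
  | cons c rest =>
    have hA : (pvALoop (c :: rest) none []).2 = pvRuns c 1 rest := by
      have h0 : pvALoop (c :: rest) none [] = pvALoop rest (some c) ([] ++ [1]) := by
        simp [pvALoop]
      rw [h0, pvALoop_groups rest c 1 []]
      simp
    have key : (2 : Int) ∈ pvRuns c 1 rest ↔ ∃ i, pvW (c :: rest) i := by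
      have h := pvCore rest c 1 le_rfl
      rw [Nat.cast_one] at h
      simpa using h
    have hany : ((List.range ((c :: rest).length - 1)).any fun i => pvWinB (c :: rest) i) = true
        ↔ ∃ i, pvW (c :: rest) i := by
      rw [List.any_eq_true]
      constructor
      · rintro ⟨i, hi, hw⟩
        have hi' : i + 1 < (c :: rest).length := by
          simp only [List.mem_range, List.length_cons] at hi ⊢; omega
        exact ⟨i, (pvWinB_iff _ _ hi').mp hw⟩
      · rintro ⟨i, hw⟩
        have h1 := hw.1
        refine ⟨i, List.mem_range.mpr (by simp only [List.length_cons] at h1 ⊢; omega), ?_⟩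
        exact (pvWinB_iff _ _ h1).mpr hw
    rw [hA, Bool.eq_iff_iff, decide_eq_true_iff]
    exact key.trans hany.symm

-- ===== VERDICT (by name: the statement is the Claim_ definition above) =====
theorem has_strict_double_spec : Claim_equal_has_strict_double := by
  intro n _
  unfold Spec_has_strict_double has_strict_double has_strict_double_alt
  exact pvMain (PySem.Int.toChars n)
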